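-- pv_equiv track=rewrite | github.com/WouterDelouw/5WWIPython | Toets 3/Varkenslatijn.py | verwijder_medeklinkers
-- ===== SOURCE A (Python) =====
-- def verwijder_medeklinkers(woord):
--     varkenslatijnswoord = ''
--     stop = 0
--     for letter in woord:
--         if stop == 0:
--             if letter != 'a' and letter != 'e' and letter != 'i' and letter != 'o' and letter != 'u':
--                 varkenslatijnswoord = varkenslatijnswoord
--             else:
--                 varkenslatijnswoord += letter
--                 stop = 1
--         else:
--             varkenslatijnswoord += letter
--     return varkenslatijnswoord
-- ===== SOURCE B (Python) =====
-- def verwijder_medeklinkers(woord):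
--     i = next((j for j, c in enumerate(woord) if c in 'aeiou'), None)
--     return woord[i:] if i is not None else ''
-- ===== Notes on version B (the rewrite author's own statement) =====
-- stated objective: simpler
-- what changed: B finds the index of the first vowel once and returns a single tail slice, replacing A's per-character string accumulation with a stop flag.
import Mathlib
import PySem

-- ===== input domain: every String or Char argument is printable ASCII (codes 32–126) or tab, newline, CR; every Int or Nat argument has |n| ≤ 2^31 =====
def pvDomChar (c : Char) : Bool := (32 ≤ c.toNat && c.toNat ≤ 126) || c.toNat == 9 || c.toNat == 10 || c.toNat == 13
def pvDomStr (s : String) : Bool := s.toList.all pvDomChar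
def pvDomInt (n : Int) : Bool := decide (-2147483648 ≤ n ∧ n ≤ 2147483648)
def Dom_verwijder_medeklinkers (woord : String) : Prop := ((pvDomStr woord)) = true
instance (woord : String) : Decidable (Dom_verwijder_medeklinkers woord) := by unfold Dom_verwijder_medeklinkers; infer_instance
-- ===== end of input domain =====

-- B computes the first-vowel index once and returns one tail slice, instead of A's
-- per-character accumulation with a stop flag (objective: simpler).


-- ===== PORT A =====
-- loop body of A's for-loop; state = (varkenslatijnswoord as List Char, stop)
def vmStep (st : List Char × Int) (letter : Char) : List Char × Int :=
  if st.2 == 0 then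
    if letter != 'a' && letter != 'e' && letter != 'i' && letter != 'o' && letter != 'u' then
      (st.1, st.2)
    else
      (st.1 ++ [letter], 1)
  else
    (st.1 ++ [letter], st.2)

def verwijder_medeklinkers (woord : String) : String :=
  String.ofList (woord.toList.foldl vmStep ([], 0)).1

-- ===== PORT B =====
def vmIsVowel (c : Char) : Bool := c == 'a' || c == 'e' || c == 'i' || c == 'o' || c == 'u'

def verwijder_medeklinkers_alt (woord : String) : String :=
  match woord.toList.findIdx? vmIsVowel with
  | some i => String.ofList (woord.toList.drop i)
  | none => ""

-- ===== PRECONDITION & SPEC =====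
def Spec_verwijder_medeklinkers (woord : String) (out : String) : Prop := out = verwijder_medeklinkers_alt woord
instance (woord : String) (out : String) : Decidable (Spec_verwijder_medeklinkers woord out) := by unfold Spec_verwijder_medeklinkers; infer_instance

-- ===== CLAIM (what is proved, stated in full; the proofs are below) =====
def Claim_equal_verwijder_medeklinkers : Prop := ∀ (woord : String), Dom_verwijder_medeklinkers woord → Spec_verwijder_medeklinkers woord (verwijder_medeklinkers woord)

-- ===== LEMMAS AND PROOFS =====
theorem vmStep_stopped (l : List Char) (acc : List Char) :
    l.foldl vmStep (acc, 1) = (acc ++ l, 1) := by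
  induction l generalizing acc with
  | nil => simp
  | cons c t ih => simp [vmStep, List.foldl_cons, ih]

theorem vm_cond (c : Char) :
    (c != 'a' && c != 'e' && c != 'i' && c != 'o' && c != 'u') = !vmIsVowel c := by
  simp [vmIsVowel, bne, Bool.not_or, Bool.and_assoc]

theorem vm_main (l : List Char) (acc : List Char) :
    (l.foldl vmStep (acc, 0)).1 =
      acc ++ (match l.findIdx? vmIsVowel with
              | some i => l.drop i
              | none => []) := by
  induction l generalizing acc with
  | nil => simp
  | cons c t ih =>
    cases h : vmIsVowel c
    · have hstep : vmStep (acc, 0) c = (acc, 0) := by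
        simp [vmStep, vm_cond, h]
      simp only [List.foldl_cons, hstep, ih, List.findIdx?_cons, h]
      cases hf : t.findIdx? vmIsVowel <;> simp [List.drop_succ_cons]
    · have hstep : vmStep (acc, 0) c = (acc ++ [c], 1) := by
        simp [vmStep, vm_cond, h]
      simp [List.foldl_cons, hstep, vmStep_stopped, List.findIdx?_cons, h]

-- ===== VERDICT (by name: the statement is the Claim_ definition above) =====
theorem verwijder_medeklinkers_spec : Claim_equal_verwijder_medeklinkers := by
  intro woord _
  unfold Spec_verwijder_medeklinkers verwijder_medeklinkers verwijder_medeklinkers_alt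
  rw [vm_main]
  cases h : woord.toList.findIdx? vmIsVowel <;> simp
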